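-- pv_equiv track=rewrite | github.com/Ravichandran-Arumugadas/BUT-Informatique | Première année en BUT Informatique/S1.02 - Comparaison d'approches algorithmiques/community_detection.py | dico_reseau
-- ===== SOURCE A (Python) =====
-- def liste_amis(amis, prenom):
--     """
--         Retourne la liste des amis de prenom en fonction du tableau amis.
--     """
--     prenoms_amis = []
--     i = 0
--     while i < len(amis)//2:
--         if amis[2 * i] == prenom:
--             prenoms_amis.append(amis[2*i+1])
--         elif amis[2*i+1] == prenom:
--             prenoms_amis.append(amis[2*i])
--         i += 1
--     return prenoms_amis
--
-- def personnes_reseau(amis):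
--     """ Retourne un tableau contenant la liste des personnes du réseau."""
--     people = []
--     i = 0
--     while i < len(amis):
--         if amis[i] not in people:
--             people.append(amis[i])
--         i += 1
--     return people
--
-- def dico_reseau(amis):
--     """ Retourne le dictionnaire correspondant au réseau."""
--     dico = {}
--     people = personnes_reseau(amis)
--     i = 0
--     while i < len(people):
--         dico[people[i]] = liste_amis(amis, people[i])
--         i += 1
--     return dico
-- ===== SOURCE B (Python) =====
-- def dico_reseau(amis):
--     """ Retourne le dictionnaire correspondant au réseau."""
--     dico = {}
--     for x in amis:
--         dico.setdefault(x, [])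
--     for i in range(len(amis) // 2):
--         a, b = amis[2 * i], amis[2 * i + 1]
--         dico[a].append(b)
--         if a != b:
--             dico[b].append(a)
--     return dico
-- ===== Notes on version B (the rewrite author's own statement) =====
-- stated objective: faster
-- what changed: A rescans the whole pair list once per distinct person (liste_amis inside a loop over people); B builds the dict in two linear passes: one setdefault pass fixing key order, then one pass over the pairs appending each friendship to both endpoints' lists.
import Mathlib
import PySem

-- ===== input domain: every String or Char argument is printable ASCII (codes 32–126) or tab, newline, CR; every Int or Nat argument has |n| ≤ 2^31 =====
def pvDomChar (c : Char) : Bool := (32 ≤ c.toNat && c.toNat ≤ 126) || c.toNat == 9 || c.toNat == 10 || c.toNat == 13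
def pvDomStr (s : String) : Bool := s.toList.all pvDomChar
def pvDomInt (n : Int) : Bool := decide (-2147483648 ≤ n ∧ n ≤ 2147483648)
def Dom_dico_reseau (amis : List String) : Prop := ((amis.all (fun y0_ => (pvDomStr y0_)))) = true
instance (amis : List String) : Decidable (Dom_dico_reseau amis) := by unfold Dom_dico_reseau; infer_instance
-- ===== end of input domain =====

-- B replaces A's quadratic per-person rescans of `amis` with a single adjacency-building
-- pass over the pairs after one key-creating pass (objective: faster, O(n^2) -> O(n)).

-- ===== PORT A =====
-- loop body of liste_amis (one iteration of the while loop, at pair index i)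
def pvStepA (amis : List String) (prenom : String) (acc : List String) (i : Int) : List String :=
  if PySem.List.pyGetD amis (2 * i) "" = prenom then
    acc ++ [PySem.List.pyGetD amis (2 * i + 1) ""]
  else if PySem.List.pyGetD amis (2 * i + 1) "" = prenom then
    acc ++ [PySem.List.pyGetD amis (2 * i) ""]
  else acc

def pvListeAmis (amis : List String) (prenom : String) : List String :=
  (PySem.List.pyRange 0 (PySem.Int.floordiv (amis.length : Int) 2) 1).foldl
    (pvStepA amis prenom) []

def pvPersonnesReseau (amis : List String) : List String :=
  amis.foldl (fun people x => if x ∈ people then people else people ++ [x]) []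

def dico_reseau (amis : List String) : List (String × List String) :=
  ((pvPersonnesReseau amis).foldl
      (fun d p => d.insert p (pvListeAmis amis p))
      (PySem.Dict.empty : PySem.Dict String (List String))).items

-- ===== PORT B =====
-- loop body of B's pair pass: dico[a].append(b); if a != b: dico[b].append(a)
-- (the keys a, b are always present, so dict-modify with default [] is exact here)
def pvStepB (amis : List String) (d : PySem.Dict String (List String)) (i : Int) :
    PySem.Dict String (List String) :=
  let a := PySem.List.pyGetD amis (2 * i) ""
  let b := PySem.List.pyGetD amis (2 * i + 1) ""
  let d1 := d.modify a [] (· ++ [b])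
  if a ≠ b then d1.modify b [] (· ++ [a]) else d1

def dico_reseau_alt (amis : List String) : List (String × List String) :=
  ((PySem.List.pyRange 0 (PySem.Int.floordiv (amis.length : Int) 2) 1).foldl
      (pvStepB amis)
      (amis.foldl (fun d x => d.setdefault x []) PySem.Dict.empty)).items

-- ===== PRECONDITION & SPEC =====
def Spec_dico_reseau (amis : List String) (out : List (String × List String)) : Prop := out = dico_reseau_alt amis
instance (amis : List String) (out : List (String × List String)) : Decidable (Spec_dico_reseau amis out) := by unfold Spec_dico_reseau; infer_instance

-- ===== CLAIM (what is proved, stated in full; the proofs are below) =====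
def Claim_equal_dico_reseau : Prop := ∀ (amis : List String), Dom_dico_reseau amis → Spec_dico_reseau amis (dico_reseau amis)

-- ===== LEMMAS AND PROOFS =====

-- the dictionary whose keys are `ppl` (in order) and whose value at p is f p
def pvMapD (f : String → List String) (ppl : List String) : PySem.Dict String (List String) :=
  ⟨ppl.map fun p => (p, f p)⟩

theorem pvMapD_congr {f g : String → List String} {ppl : List String}
    (h : ∀ p ∈ ppl, f p = g p) : pvMapD f ppl = pvMapD g ppl := by
  unfold pvMapD
  congr 1
  exact List.map_congr_left (fun p hp => by rw [h p hp])

theorem contains_pvMapD (f : String → List String) (ppl : List String) (x : String) :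
    (pvMapD f ppl).contains x = decide (x ∈ ppl) := by
  induction ppl with
  | nil => simp [pvMapD, PySem.Dict.contains]
  | cons q qs ih =>
      simp [pvMapD, PySem.Dict.contains] at *
      by_cases h : q = x
      · simp [h, ih]
      · have h' : ¬ x = q := fun hh => h hh.symm
        simp [h, h', ih]

theorem getD_pvMapD {f : String → List String} {ppl : List String} {x : String}
    (hx : x ∈ ppl) (d0 : List String) : (pvMapD f ppl).getD x d0 = f x := by
  induction ppl with
  | nil => cases hx
  | cons q qs ih =>
      rcases List.mem_cons.mp hx with hx | hx
      · subst hx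
        simp [pvMapD, PySem.Dict.getD, PySem.Dict.get?]
      · by_cases h : q = x
        · subst h; simp [pvMapD, PySem.Dict.getD, PySem.Dict.get?]
        · have := ih hx
          simpa [pvMapD, PySem.Dict.getD, PySem.Dict.get?, List.find?, h] using this

theorem insert_pvMapD {f : String → List String} {ppl : List String} {x : String}
    (hx : x ∈ ppl) (v : List String) :
    (pvMapD f ppl).insert x v = pvMapD (fun p => if p = x then v else f p) ppl := by
  have hc : (pvMapD f ppl).contains x = true := by
    rw [contains_pvMapD]; simpa using hx
  unfold pvMapD at *
  simp only [PySem.Dict.insert, hc, if_true]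
  congr 1
  rw [List.map_map]
  refine List.map_congr_left (fun p _ => ?_)
  by_cases h : p = x <;> simp [h]

theorem modify_pvMapD {f : String → List String} {ppl : List String} {x : String}
    (hx : x ∈ ppl) (g : List String → List String) :
    (pvMapD f ppl).modify x [] g = pvMapD (fun p => if p = x then g (f x) else f p) ppl := by
  simp only [PySem.Dict.modify, getD_pvMapD hx, insert_pvMapD hx]

theorem mem_personnes_aux (amis : List String) :
    ∀ (acc : List String) (x : String),
      x ∈ amis.foldl (fun people y => if y ∈ people then people else people ++ [y]) acc ↔
      x ∈ acc ∨ x ∈ amis := by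
  induction amis with
  | nil => intro acc x; simp
  | cons a rest ih =>
      intro acc x
      simp only [List.foldl_cons]
      by_cases h : a ∈ acc
      · rw [if_pos h, ih]
        constructor
        · rintro (hx | hx)
          · exact Or.inl hx
          · exact Or.inr (List.mem_cons_of_mem _ hx)
        · rintro (hx | hx)
          · exact Or.inl hx
          · rcases List.mem_cons.mp hx with rfl | hx
            · exact Or.inl h
            · exact Or.inr hx
      · rw [if_neg h, ih]
        constructor
        · rintro (hx | hx)
          · rcases List.mem_append.mp hx with hx | hx
            · exact Or.inl hx
            · exact Or.inr (by simp [List.mem_singleton.mp hx])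
          · exact Or.inr (List.mem_cons_of_mem _ hx)
        · rintro (hx | hx)
          · exact Or.inl (List.mem_append.mpr (Or.inl hx))
          · rcases List.mem_cons.mp hx with rfl | hx
            · exact Or.inl (List.mem_append.mpr (Or.inr (by simp)))
            · exact Or.inr hx

theorem nodup_personnes_aux (amis : List String) :
    ∀ (acc : List String), acc.Nodup →
      (amis.foldl (fun people y => if y ∈ people then people else people ++ [y]) acc).Nodup := by
  induction amis with
  | nil => intro acc h; simpa
  | cons a rest ih =>
      intro acc h
      by_cases ha : a ∈ acc
      · simpa [ha] using ih acc h
      · simp only [List.foldl_cons, if_neg ha]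
        refine ih _ ?_
        rw [List.nodup_append]
        refine ⟨h, List.nodup_singleton _, ?_⟩
        intro y hy z hz
        obtain rfl := List.mem_singleton.mp hz
        exact fun hh => ha (hh ▸ hy)

theorem mem_personnes {amis : List String} {x : String} (hx : x ∈ amis) :
    x ∈ pvPersonnesReseau amis := by
  unfold pvPersonnesReseau
  rw [mem_personnes_aux]
  simp [hx]

theorem nodup_personnes (amis : List String) : (pvPersonnesReseau amis).Nodup :=
  nodup_personnes_aux amis [] List.nodup_nil

theorem foldA (F : String → List String) :
    ∀ (ppl : List String) (d : PySem.Dict String (List String)),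
      ppl.Nodup → (∀ p ∈ ppl, d.contains p = false) →
      (ppl.foldl (fun d p => d.insert p (F p)) d).items = d.items ++ ppl.map (fun p => (p, F p)) := by
  intro ppl
  induction ppl with
  | nil => intro d _ _; simp
  | cons q qs ih =>
      intro d hnd hc
      have hq : d.contains q = false := hc q (by simp)
      have hins : d.insert q (F q) = ⟨d.items ++ [(q, F q)]⟩ := by
        simp [PySem.Dict.insert, hq]
      simp only [List.foldl_cons, hins]
      rw [ih ⟨d.items ++ [(q, F q)]⟩ (List.Nodup.of_cons hnd) ?_]
      · simp
      · intro p hp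
        have hqp : ¬ (q = p) := fun h => (List.nodup_cons.mp hnd).1 (by rw [h]; exact hp)
        have hdp := hc p (by simp [hp])
        simp only [PySem.Dict.contains] at hdp ⊢
        simp [List.any_append, hdp, hqp]

theorem foldSet :
    ∀ (amis ppl : List String),
      amis.foldl (fun d x => d.setdefault x []) (pvMapD (fun _ => []) ppl) =
      pvMapD (fun _ => [])
        (amis.foldl (fun people x => if x ∈ people then people else people ++ [x]) ppl) := by
  intro amis
  induction amis with
  | nil => intro ppl; simp
  | cons a rest ih =>
      intro ppl
      by_cases ha : a ∈ ppl
      · have hc : (pvMapD (fun _ => ([] : List String)) ppl).contains a = true := by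
          rw [contains_pvMapD]; simpa using ha
        have hstep : (pvMapD (fun _ => ([] : List String)) ppl).setdefault a [] =
            pvMapD (fun _ => []) ppl := by
          simp [PySem.Dict.setdefault, hc]
        simp only [List.foldl_cons, hstep, if_pos ha, ih]
      · have hc : (pvMapD (fun _ => ([] : List String)) ppl).contains a = false := by
          rw [contains_pvMapD]; simp [ha]
        have hstep : (pvMapD (fun _ => ([] : List String)) ppl).setdefault a [] =
            pvMapD (fun _ => []) (ppl ++ [a]) := by
          unfold PySem.Dict.setdefault
          rw [hc]
          simp [pvMapD]
        simp only [List.foldl_cons, hstep, if_neg ha, ih]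

theorem foldB (amis : List String) :
    ∀ (m : Nat), 2 * m ≤ amis.length →
      (PySem.List.pyRange 0 (m : Int) 1).foldl (pvStepB amis)
          (pvMapD (fun _ => []) (pvPersonnesReseau amis)) =
      pvMapD (fun p => (PySem.List.pyRange 0 (m : Int) 1).foldl (pvStepA amis p) [])
        (pvPersonnesReseau amis) := by
  intro m
  induction m with
  | zero => intro _; simp
  | succ n ih =>
      intro hle
      have hle' : 2 * n ≤ amis.length := by omega
      have hcast : ((n + 1 : Nat) : Int) = (n : Int) + 1 := by push_cast; ring
      rw [hcast, PySem.List.pyRange_one_succ_right (by positivity), List.foldl_append,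
        ih hle']
      simp only [List.foldl_cons, List.foldl_nil]
      have h2n : (0 : Int) ≤ 2 * (n : Int) := by positivity
      have h2n' : 2 * (n : Int) < (amis.length : Int) := by omega
      have h2n1 : (0 : Int) ≤ 2 * (n : Int) + 1 := by positivity
      have h2n1' : 2 * (n : Int) + 1 < (amis.length : Int) := by omega
      set a := PySem.List.pyGetD amis (2 * (n : Int)) "" with hadef
      set b := PySem.List.pyGetD amis (2 * (n : Int) + 1) "" with hbdef
      have hamem : a ∈ pvPersonnesReseau amis := by
        rw [hadef, PySem.List.pyGetD_eq_getElem amis "" h2n h2n']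
        exact mem_personnes (List.getElem_mem _)
      have hbmem : b ∈ pvPersonnesReseau amis := by
        rw [hbdef, PySem.List.pyGetD_eq_getElem amis "" h2n1 h2n1']
        exact mem_personnes (List.getElem_mem _)
      set Fn := fun p => (PySem.List.pyRange 0 (n : Int) 1).foldl (pvStepA amis p) [] with hFn
      have hrhs : pvMapD
            (fun p => List.foldl (pvStepA amis p) []
              (PySem.List.pyRange 0 (n : Int) 1 ++ [(n : Int)])) (pvPersonnesReseau amis) =
          pvMapD (fun p => pvStepA amis p (Fn p) (n : Int)) (pvPersonnesReseau amis) :=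
        pvMapD_congr (fun p _ => by
          simp only [List.foldl_append, List.foldl_cons, List.foldl_nil, hFn])
      rw [hrhs]
      unfold pvStepB
      simp only [← hadef, ← hbdef]
      by_cases hab : a = b
      · rw [if_neg (by simp [hab])]
        rw [modify_pvMapD hamem]
        refine pvMapD_congr (fun p hp => ?_)
        unfold pvStepA
        rw [← hadef, ← hbdef]
        by_cases hpa : p = a
        · obtain rfl := hpa
          simp
        · have h1 : ¬ a = p := fun hh => hpa hh.symm
          have h2 : ¬ b = p := by rw [← hab]; exact h1
          simp [hpa, h1, h2]
      · have hba : ¬ b = a := fun hh => hab hh.symm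
        rw [if_pos hab, modify_pvMapD hamem, modify_pvMapD hbmem]
        refine pvMapD_congr (fun p hp => ?_)
        unfold pvStepA
        rw [← hadef, ← hbdef]
        by_cases hpa : p = a
        · obtain rfl := hpa
          simp [hab]
        · by_cases hpb : p = b
          · obtain rfl := hpb
            simp [hab, hba]
          · have h1 : ¬ a = p := fun hh => hpa hh.symm
            have h2 : ¬ b = p := fun hh => hpb hh.symm
            simp [hpa, hpb, h1, h2]

theorem floordiv_len (n : Nat) : PySem.Int.floordiv (n : Int) 2 = ((n / 2 : Nat) : Int) := by
  simp [PySem.Int.floordiv, Int.fdiv_eq_ediv]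

-- ===== VERDICT (by name: the statement is the Claim_ definition above) =====
theorem dico_reseau_spec : Claim_equal_dico_reseau := by
  intro amis _
  unfold Spec_dico_reseau dico_reseau dico_reseau_alt
  have hd0 : amis.foldl (fun d x => d.setdefault x []) PySem.Dict.empty =
      pvMapD (fun _ => []) (pvPersonnesReseau amis) := by
    have := foldSet amis []
    simpa [pvMapD, PySem.Dict.empty, pvPersonnesReseau] using this
  rw [hd0, floordiv_len, foldB amis (amis.length / 2) (by omega),
    foldA (pvListeAmis amis) (pvPersonnesReseau amis) PySem.Dict.empty (nodup_personnes amis)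
      (fun p _ => by simp [PySem.Dict.contains, PySem.Dict.empty])]
  simp only [PySem.Dict.empty, List.nil_append]
  unfold pvMapD pvListeAmis
  rw [floordiv_len]
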